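-- pv_equiv track=rewrite | github.com/juyoung810/idecs-algorithm-study | KKS/boj/19637/19637.py | print_tag
-- ===== SOURCE A (Python) =====
-- def print_tag(stat, tags):
--     low = 0
--     high = len(tags) - 1
--     ans = 0
--     while low <= high:
--         mid = (low + high) // 2
--         if int(tags[mid][1]) >= stat:
--             high = mid - 1
--             ans = mid
--         else:
--             low = mid + 1
--     return ans
-- ===== SOURCE B (Python) =====
-- def print_tag(stat, tags):
--     # Divide-and-conquer over actual list segments: parse all powers once,
--     # then recurse on slices (no low/high index arithmetic, no accumulator).
--     powers = [int(t) for _, t in tags]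
--
--     def go(base, seg):
--         if not seg:
--             return None
--         m = (len(seg) - 1) // 2
--         if seg[m] >= stat:
--             r = go(base, seg[:m])
--             return base + m if r is None else r
--         return go(base + m + 1, seg[m + 1:])
--
--     r = go(0, powers)
--     return 0 if r is None else r
-- ===== Notes on version B (the rewrite author's own statement) =====
-- stated objective: alternative
-- what changed: The iterative low/high binary-search loop threading an 'ans' accumulator is replaced by a single up-front parse of all power strings followed by divide-and-conquer recursion on actual list slices, combining the result on return.
-- outside the precondition, e.g. on print_tag(0, [('a', '1'), ('b', 'x')]): A returns 0, B raises ValueError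
import Mathlib
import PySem

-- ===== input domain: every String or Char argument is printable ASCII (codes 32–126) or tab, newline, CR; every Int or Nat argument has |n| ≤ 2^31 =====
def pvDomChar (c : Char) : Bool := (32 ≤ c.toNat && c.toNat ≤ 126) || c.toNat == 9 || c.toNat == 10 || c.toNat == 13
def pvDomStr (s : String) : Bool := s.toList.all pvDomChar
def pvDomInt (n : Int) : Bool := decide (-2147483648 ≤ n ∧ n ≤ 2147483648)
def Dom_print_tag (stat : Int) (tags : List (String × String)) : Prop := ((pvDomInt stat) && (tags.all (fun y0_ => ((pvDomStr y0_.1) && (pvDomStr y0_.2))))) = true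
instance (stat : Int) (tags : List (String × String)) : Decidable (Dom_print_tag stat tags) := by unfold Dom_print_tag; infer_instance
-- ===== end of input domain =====

-- B replaces the iterative low/high binary-search loop by a one-pass parse of all powers
-- followed by divide-and-conquer recursion on list segments (alternative decomposition, same cost).


-- ===== PORT A =====
-- value probed at index mid: int(tags[mid][1]); under Pre_ the index is in range and the
-- string parses, so the `getD` defaults are never consulted on admitted inputs.
def pvProbe (tags : List (String × String)) (mid : Int) : Int :=
  (PySem.Int.ofStr? ((PySem.List.pyGet? tags mid).getD ("", "")).2).getD 0

-- the while loop of A, threading low/high/ans exactly as the Python does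
def pvLoopA (stat : Int) (tags : List (String × String)) (low high ans : Int) : Int :=
  if _h : low ≤ high then
    let mid := PySem.Int.floordiv (low + high) 2
    if pvProbe tags mid ≥ stat then
      pvLoopA stat tags low (mid - 1) mid
    else
      pvLoopA stat tags (mid + 1) high ans
  else ans
termination_by (high + 1 - low).toNat
decreasing_by
  · have := PySem.Int.floordiv_two_mid_bounds (lo := low) (hi := high) _h
    omega
  · have := PySem.Int.floordiv_two_mid_bounds (lo := low) (hi := high) _h
    omega

def print_tag (stat : Int) (tags : List (String × String)) : Int :=
  pvLoopA stat tags 0 ((tags.length : Int) - 1) 0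

-- ===== PORT B =====
-- int(t) for each power string, parsed once up front (under Pre_ every string parses)
def pvParse (p : String × String) : Int := (PySem.Int.ofStr? p.2).getD 0

-- go(base, seg): divide-and-conquer on the actual segment list; none = no hit in seg
def pvGoB (stat : Int) (base : Nat) (seg : List Int) : Option Int :=
  if _h : seg.isEmpty then none
  else
    let m := (seg.length - 1) / 2
    if seg.getD m 0 ≥ stat then
      match pvGoB stat base (seg.take m) with
      | none => some ((base + m : Nat) : Int)
      | some r => some r
    else
      pvGoB stat (base + m + 1) (seg.drop (m + 1))
termination_by seg.length
decreasing_by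
  · have : seg.length ≠ 0 := by simpa [List.isEmpty_iff_length_eq_zero] using _h
    simp only [List.length_take]; omega
  · have : seg.length ≠ 0 := by simpa [List.isEmpty_iff_length_eq_zero] using _h
    simp only [List.length_drop]; omega

def print_tag_alt (stat : Int) (tags : List (String × String)) : Int :=
  match pvGoB stat 0 (tags.map pvParse) with
  | none => 0
  | some r => r

-- ===== PRECONDITION & SPEC =====
-- Pre_ excludes lists containing a power string int() cannot parse (there Python A raises
-- ValueError when it probes it; if such an entry happens never to be probed A still returns,
-- while B, which parses every entry up front, raises — see the cite in claim.json).
def Pre_print_tag (stat : Int) (tags : List (String × String)) : Prop :=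
  ∀ p ∈ tags, (PySem.Int.ofStr? p.2).isSome
instance (stat : Int) (tags : List (String × String)) : Decidable (Pre_print_tag stat tags) := by
  unfold Pre_print_tag; infer_instance

def pvWitness_print_tag : Int × (List (String × String)) := (3, [("a", "1"), ("b", "4")])

def Spec_print_tag (stat : Int) (tags : List (String × String)) (out : Int) : Prop := out = print_tag_alt stat tags
instance (stat : Int) (tags : List (String × String)) (out : Int) : Decidable (Spec_print_tag stat tags out) := by unfold Spec_print_tag; infer_instance

-- ===== CLAIM (what is proved, stated in full; the proofs are below) =====
def Claim_equal_print_tag : Prop := ∀ (stat : Int) (tags : List (String × String)), Dom_print_tag stat tags → Pre_print_tag stat tags → Spec_print_tag stat tags (print_tag stat tags)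

-- ===== LEMMAS AND PROOFS =====

-- the loop on [low, high] equals B's recursion on the corresponding parsed segment,
-- with the accumulator ans as the default for a miss
theorem pvLoopA_eq_goB (stat : Int) (tags : List (String × String)) :
    ∀ (low high ans : Int), 0 ≤ low → high < (tags.length : Int) →
      pvLoopA stat tags low high ans
        = (pvGoB stat low.toNat
            (((tags.map pvParse).drop low.toNat).take (high + 1 - low).toNat)).getD ans := by
  intro low high ans
  induction low, high, ans using pvLoopA.induct stat tags with
  | case1 low high ans h mid hp ih =>
    intro hlow hhigh
    set P := tags.map pvParse with hP
    have hPlen : P.length = tags.length := by simp [hP]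
    set L := low.toNat with hL
    set k := (high + 1 - low).toNat with hk
    set seg := (P.drop L).take k with hseg
    have hseglen : seg.length = k := by simp [hseg]; omega
    have hk1 : 1 ≤ k := by omega
    have hm : mid = ((L + (k - 1) / 2 : Nat) : Int) := by
      have hmid : mid = PySem.Int.floordiv (low + high) 2 := rfl
      rw [PySem.Int.floordiv_eq_ediv_of_pos (by omega)] at hmid
      omega
    have hmlt : (k - 1) / 2 < k := by omega
    have hidx : L + (k - 1) / 2 < tags.length := by omega
    -- the probed values agree
    have hprobe : seg.getD ((k - 1) / 2) 0 = pvProbe tags mid := by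
      have h1 : seg[(k - 1) / 2]? = P[L + (k - 1) / 2]? := by
        rw [hseg, List.getElem?_take_of_lt (by omega), List.getElem?_drop]
      have h2 : P[L + (k - 1) / 2]? = (tags[L + (k - 1) / 2]?).map pvParse := by
        simp [hP]
      rw [List.getD, h1, h2, hm]
      rw [pvProbe, PySem.List.pyGet?_natCast]
      cases h3 : tags[L + (k - 1) / 2]? with
      | none => simp at h3; omega
      | some p => simp [pvParse]
    rw [pvLoopA, dif_pos h]
    have hne : ¬ seg.isEmpty = true := by
      rw [List.isEmpty_iff]; intro hc; rw [hc] at hseglen; simp at hseglen; omega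
    rw [pvGoB, dif_neg hne]
    simp only [hseglen]
    show (if pvProbe tags mid ≥ stat then pvLoopA stat tags low (mid - 1) mid
          else pvLoopA stat tags (mid + 1) high ans)
        = (if seg.getD ((k - 1) / 2) 0 ≥ stat then
             (match pvGoB stat L (seg.take ((k - 1) / 2)) with
              | none => some ((L + (k - 1) / 2 : Nat) : Int)
              | some r => some r)
           else pvGoB stat (L + (k - 1) / 2 + 1) (seg.drop ((k - 1) / 2 + 1))).getD ans
    rw [hprobe, if_pos hp, if_pos hp]
    have htake : seg.take ((k - 1) / 2) = (P.drop L).take ((mid - 1) + 1 - low).toNat := by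
      rw [hseg, List.take_take]
      congr 1
      omega
    rw [ih hlow (by omega), htake]
    cases pvGoB stat L ((P.drop L).take ((mid - 1) + 1 - low).toNat) with
    | none => simp [hm]
    | some r => rfl
  | case2 low high ans h mid hp ih =>
    intro hlow hhigh
    set P := tags.map pvParse with hP
    have hPlen : P.length = tags.length := by simp [hP]
    set L := low.toNat with hL
    set k := (high + 1 - low).toNat with hk
    set seg := (P.drop L).take k with hseg
    have hseglen : seg.length = k := by simp [hseg]; omega
    have hk1 : 1 ≤ k := by omega
    have hm : mid = ((L + (k - 1) / 2 : Nat) : Int) := by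
      have hmid : mid = PySem.Int.floordiv (low + high) 2 := rfl
      rw [PySem.Int.floordiv_eq_ediv_of_pos (by omega)] at hmid
      omega
    have hidx : L + (k - 1) / 2 < tags.length := by omega
    have hprobe : seg.getD ((k - 1) / 2) 0 = pvProbe tags mid := by
      have h1 : seg[(k - 1) / 2]? = P[L + (k - 1) / 2]? := by
        rw [hseg, List.getElem?_take_of_lt (by omega), List.getElem?_drop]
      have h2 : P[L + (k - 1) / 2]? = (tags[L + (k - 1) / 2]?).map pvParse := by
        simp [hP]
      rw [List.getD, h1, h2, hm]
      rw [pvProbe, PySem.List.pyGet?_natCast]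
      cases h3 : tags[L + (k - 1) / 2]? with
      | none => simp at h3; omega
      | some p => simp [pvParse]
    rw [pvLoopA, dif_pos h]
    have hne : ¬ seg.isEmpty = true := by
      rw [List.isEmpty_iff]; intro hc; rw [hc] at hseglen; simp at hseglen; omega
    rw [pvGoB, dif_neg hne]
    simp only [hseglen]
    show (if pvProbe tags mid ≥ stat then pvLoopA stat tags low (mid - 1) mid
          else pvLoopA stat tags (mid + 1) high ans)
        = (if seg.getD ((k - 1) / 2) 0 ≥ stat then
             (match pvGoB stat L (seg.take ((k - 1) / 2)) with
              | none => some ((L + (k - 1) / 2 : Nat) : Int)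
              | some r => some r)
           else pvGoB stat (L + (k - 1) / 2 + 1) (seg.drop ((k - 1) / 2 + 1))).getD ans
    rw [hprobe, if_neg hp, if_neg hp]
    have hdrop : seg.drop ((k - 1) / 2 + 1)
        = (P.drop (mid + 1).toNat).take (high + 1 - (mid + 1)).toNat := by
      rw [hseg, List.drop_take, List.drop_drop]
      congr 1
      · omega
      · congr 1; omega
    have hbase : L + (k - 1) / 2 + 1 = (mid + 1).toNat := by omega
    rw [hdrop, hbase, ih (by omega) (by omega)]
  | case3 low high ans h =>
    intro _ _
    have hk0 : (high + 1 - low).toNat = 0 := by omega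
    rw [pvLoopA, dif_neg h, hk0]
    simp [pvGoB]

-- ===== VERDICT (by name: the statement is the Claim_ definition above) =====
theorem print_tag_spec : Claim_equal_print_tag := by
  intro stat tags _ _
  unfold Spec_print_tag print_tag print_tag_alt
  rw [pvLoopA_eq_goB stat tags 0 ((tags.length : Int) - 1) 0 (by omega) (by omega)]
  have h : (((tags.length : Int) - 1) + 1 - 0).toNat = (tags.map pvParse).length := by
    simp
  rw [h]
  simp only [Int.toNat_zero, List.drop_zero, List.take_length]
  cases pvGoB stat 0 (tags.map pvParse) with
  | none => rfl
  | some r => rfl
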